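-- pv_equiv track=rewrite | github.com/picasso250/skills | wechat-mp-publish/scripts/md-to-txt.py | collapse_cross_script_spaces
-- ===== SOURCE A (Python) =====
-- def is_ascii_letter(char: str) -> bool:
--     return ("A" <= char <= "Z") or ("a" <= char <= "z")
--
-- def collapse_cross_script_spaces(text: str) -> str:
--     chars = list(text)
--     result: list[str] = []
--     for idx, char in enumerate(chars):
--         if char != " ":
--             result.append(char)
--             continue
--         if idx == 0 or idx == len(chars) - 1:
--             result.append(char)
--             continue
--
--         left = chars[idx - 1]
--         right = chars[idx + 1]
--         left_is_letter = is_ascii_letter(left)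
--         right_is_letter = is_ascii_letter(right)
--         if left_is_letter != right_is_letter and left != "\n" and right != "\n":
--             continue
--
--         result.append(char)
--     return "".join(result)
-- ===== SOURCE B (Python) =====
-- import re
--
-- # one compiled substitution: delete a literal space whose original neighbours are an
-- # ASCII letter on one side and a non-letter (never a newline) on the other
-- _CROSS_SPACE = re.compile(r"(?<=[A-Za-z]) (?=[^A-Za-z\n])|(?<=[^A-Za-z\n]) (?=[A-Za-z])")
--
-- def collapse_cross_script_spaces(text: str) -> str:
--     return _CROSS_SPACE.sub("", text)
-- ===== Notes on version B (the rewrite author's own statement) =====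
-- stated objective: idiomatic
-- what changed: Replaces the manual enumerate/index scan that inspects chars[idx-1]/chars[idx+1] with boundary guards by a single compiled re.sub whose zero-width lookarounds ((?<=[A-Za-z]) (?=[^A-Za-z\n]) | the mirror alternative) delete exactly the cross-class spaces; the string-boundary and newline cases fall out of the character classes and the required-context lookarounds.
import Mathlib
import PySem

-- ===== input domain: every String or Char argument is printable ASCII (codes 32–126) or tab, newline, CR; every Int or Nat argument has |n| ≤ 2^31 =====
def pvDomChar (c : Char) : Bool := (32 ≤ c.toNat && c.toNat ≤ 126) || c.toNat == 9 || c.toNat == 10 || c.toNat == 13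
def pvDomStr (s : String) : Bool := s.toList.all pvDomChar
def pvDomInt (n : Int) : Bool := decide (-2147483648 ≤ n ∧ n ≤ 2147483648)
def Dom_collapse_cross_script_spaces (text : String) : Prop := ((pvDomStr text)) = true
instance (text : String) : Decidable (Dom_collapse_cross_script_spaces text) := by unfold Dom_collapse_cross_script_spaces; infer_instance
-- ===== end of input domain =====

-- B replaces A's manual enumerate/index scan by one regular-expression substitution
-- (re.sub with zero-width lookarounds); objective: idiomatic, same cost.

-- ===== PORT A =====
def is_ascii_letter (char : Char) : Bool :=
  ('A' ≤ char && char ≤ 'Z') || ('a' ≤ char && char ≤ 'z')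

def collapse_cross_script_spaces (text : String) : String :=
  let chars := text.toList
  let result := (PySem.List.enumerate chars).foldl (fun result p =>
    let idx := p.1
    let char := p.2
    if char ≠ ' ' then result ++ [char]
    else if idx = 0 ∨ idx = PySem.List.len chars - 1 then result ++ [char]
    else
      -- both indices idx-1, idx+1 are in range here, so pyGetD is exactly chars[idx±1]
      let left := PySem.List.pyGetD chars (idx - 1) ' '
      let right := PySem.List.pyGetD chars (idx + 1) ' '
      let left_is_letter := is_ascii_letter left
      let right_is_letter := is_ascii_letter right
      if left_is_letter ≠ right_is_letter ∧ left ≠ '\n' ∧ right ≠ '\n' then result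
      else result ++ [char]) []
  String.ofList result

-- ===== PORT B =====
-- Hand-port of Source B's re.sub for its one compiled pattern
--   (?<=[A-Za-z]) (?=[^A-Za-z\n]) | (?<=[^A-Za-z\n]) (?=[A-Za-z])
-- (PySem has no regex). It is exact for this pattern: the regex scanner tries a match at
-- every position of the ORIGINAL string; a match consumes exactly the literal space (the
-- lookarounds are zero-width tests on the original neighbouring characters, so they need a
-- character to exist on that side) and is replaced by the empty string; non-matching
-- positions are copied through.
def reLetter (c : Char) : Bool := ('A' ≤ c && c ≤ 'Z') || ('a' ≤ c && c ≤ 'z')  -- class [A-Za-z]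
def reOther (c : Char) : Bool := !reLetter c && c != '\n'                        -- class [^A-Za-z\n]

def reMatchAt (s : List Char) (i : Nat) : Bool :=
  (s.getD i ' ' == ' ') &&
  ((1 ≤ i && reLetter (s.getD (i - 1) ' ') && i + 1 < s.length && reOther (s.getD (i + 1) ' '))
   || (1 ≤ i && reOther (s.getD (i - 1) ' ') && i + 1 < s.length && reLetter (s.getD (i + 1) ' ')))

def reScan (s : List Char) (i : Nat) : List Char :=
  if h : i < s.length then
    if reMatchAt s i then reScan s (i + 1)
    else s[i] :: reScan s (i + 1)
  else []
termination_by s.length - i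

def collapse_cross_script_spaces_alt (text : String) : String :=
  String.ofList (reScan text.toList 0)

-- ===== PRECONDITION & SPEC =====
def Spec_collapse_cross_script_spaces (text : String) (out : String) : Prop := out = collapse_cross_script_spaces_alt text
instance (text : String) (out : String) : Decidable (Spec_collapse_cross_script_spaces text out) := by unfold Spec_collapse_cross_script_spaces; infer_instance

-- ===== CLAIM (what is proved, stated in full; the proofs are below) =====
def Claim_equal_collapse_cross_script_spaces : Prop := ∀ (text : String), Dom_collapse_cross_script_spaces text → Spec_collapse_cross_script_spaces text (collapse_cross_script_spaces text)

-- ===== LEMMAS AND PROOFS =====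

-- the shared reference predicate: is the space at the middle position deleted?
def removable (p : Option Char) (c : Char) (n : Option Char) : Bool :=
  match p, n with
  | some l, some r =>
      c == ' ' && (is_ascii_letter l != is_ascii_letter r) && l != '\n' && r != '\n'
  | _, _ => false

-- reference structural recursion both ports are reduced to
def refGo (p : Option Char) : List Char → List Char
  | [] => []
  | c :: rest =>
      if removable p c rest.head? then refGo (some c) rest
      else c :: refGo (some c) rest

-- A's keep-decision as a boolean on one (index, char) pair, over the full char list
def keepA (cs : List Char) (p : Int × Char) : Bool :=
  if p.2 ≠ ' ' then true
  else if p.1 = 0 ∨ p.1 = PySem.List.len cs - 1 then true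
  else
    let left := PySem.List.pyGetD cs (p.1 - 1) ' '
    let right := PySem.List.pyGetD cs (p.1 + 1) ' '
    if is_ascii_letter left ≠ is_ascii_letter right ∧ left ≠ '\n' ∧ right ≠ '\n' then false
    else true

lemma bodyA_eq (cs : List Char) :
    (fun (result : List Char) (p : Int × Char) =>
      let idx := p.1
      let char := p.2
      if char ≠ ' ' then result ++ [char]
      else if idx = 0 ∨ idx = PySem.List.len cs - 1 then result ++ [char]
      else
        let left := PySem.List.pyGetD cs (idx - 1) ' '
        let right := PySem.List.pyGetD cs (idx + 1) ' '
        let left_is_letter := is_ascii_letter left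
        let right_is_letter := is_ascii_letter right
        if left_is_letter ≠ right_is_letter ∧ left ≠ '\n' ∧ right ≠ '\n' then result
        else result ++ [char])
    = (fun result p => if keepA cs p then result ++ [p.2] else result) := by
  funext r p
  simp only [keepA]
  split_ifs <;> simp_all

lemma pyGetD_mid_left (pre rest : List Char) (c : Char) (h : pre ≠ []) :
    PySem.List.pyGetD (pre ++ c :: rest) ((pre.length : Int) - 1) ' ' = pre.getLast h := by
  have hl : 0 < pre.length := List.length_pos_iff.mpr h
  rw [show ((pre.length : Int) - 1) = ((pre.length - 1 : Nat) : Int) by omega,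
      PySem.List.pyGetD_natCast, List.getD_eq_getElem?_getD,
      List.getElem?_append_left (by omega)]
  rw [List.getElem?_eq_getElem (by omega)]
  simp [List.getLast_eq_getElem]

lemma pyGetD_mid_right (pre rest : List Char) (c : Char) (h : rest ≠ []) :
    PySem.List.pyGetD (pre ++ c :: rest) ((pre.length : Int) + 1) ' ' = rest.head h := by
  rw [show ((pre.length : Int) + 1) = ((pre.length + 1 : Nat) : Int) by omega,
      PySem.List.pyGetD_natCast, List.getD_eq_getElem?_getD,
      show pre ++ c :: rest = (pre ++ [c]) ++ rest by simp,
      List.getElem?_append_right (by simp)]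
  cases rest with
  | nil => exact absurd rfl h
  | cons r rs => simp

lemma keepA_head (pre rest : List Char) (c : Char) :
    keepA (pre ++ c :: rest) ((pre.length : Int), c) = !removable pre.getLast? c rest.head? := by
  by_cases hc : c = ' '
  · by_cases hp : pre = []
    · subst hp hc
      cases rest <;> simp [keepA, removable]
    · by_cases hr : rest = []
      · subst hr hc
        have h0 : pre.getLast? = some (pre.getLast hp) := List.getLast?_eq_some_getLast hp
        simp [keepA, removable, h0, List.length_pos_iff.mpr hp]
      · have hL := pyGetD_mid_left pre rest c hp
        have hR := pyGetD_mid_right pre rest c hr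
        have h0 : pre.getLast? = some (pre.getLast hp) := List.getLast?_eq_some_getLast hp
        have h1 : rest.head? = some (rest.head hr) := List.head?_eq_some_head hr
        subst hc
        simp only [keepA, removable, h0, h1, hL, hR]
        have hlp : 0 < pre.length := List.length_pos_iff.mpr hp
        have hlr : 0 < rest.length := List.length_pos_iff.mpr hr
        rw [if_neg (by simp), if_neg (by
          simp only [PySem.List.len, List.length_append, List.length_cons]
          push_cast
          omega)]
        split_ifs with hcond <;> simp_all [bne_iff_ne] <;> tauto
  · cases h0 : pre.getLast? <;> cases h1 : rest.head? <;>
      simp [keepA, removable, hc]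

lemma mainA (l pre : List Char) :
    (((PySem.List.enumerate l (pre.length : Int)).filter (keepA (pre ++ l))).map Prod.snd)
      = refGo pre.getLast? l := by
  induction l generalizing pre with
  | nil => simp [PySem.List.enumerate_nil, refGo]
  | cons c rest ih =>
    rw [PySem.List.enumerate_cons, List.filter_cons]
    have hk := keepA_head pre rest c
    have ih' := ih (pre ++ [c])
    simp only [List.length_append, List.length_cons, List.length_nil, Nat.cast_add,
      Nat.cast_one, Nat.cast_zero, zero_add, List.getLast?_concat, List.append_assoc,
      List.singleton_append] at ih'
    rw [hk]
    by_cases h : removable pre.getLast? c rest.head? = true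
    · simp only [h, Bool.not_true, Bool.false_eq_true, if_false, ih']
      simp [refGo, h]
    · simp only [Bool.not_eq_true] at h
      simp only [h, Bool.not_false, if_true, List.map_cons, ih']
      simp [refGo, h]

-- B-side: plain getD versions of the neighbour lookups
lemma getD_mid (pre rest : List Char) (c : Char) :
    (pre ++ c :: rest).getD pre.length ' ' = c := by
  rw [List.getD_eq_getElem?_getD, List.getElem?_append_right (le_refl _)]
  simp

lemma getD_mid_left (pre rest : List Char) (c : Char) (h : pre ≠ []) :
    (pre ++ c :: rest).getD (pre.length - 1) ' ' = pre.getLast h := by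
  have hl : 0 < pre.length := List.length_pos_iff.mpr h
  rw [List.getD_eq_getElem?_getD, List.getElem?_append_left (by omega),
      List.getElem?_eq_getElem (by omega)]
  simp [List.getLast_eq_getElem]

lemma getD_mid_right (pre rest : List Char) (c : Char) (h : rest ≠ []) :
    (pre ++ c :: rest).getD (pre.length + 1) ' ' = rest.head h := by
  rw [List.getD_eq_getElem?_getD,
      show pre ++ c :: rest = (pre ++ [c]) ++ rest by simp,
      List.getElem?_append_right (by simp)]
  cases rest with
  | nil => exact absurd rfl h
  | cons r rs => simp

lemma letter_ne_nl (l : Char) (h : is_ascii_letter l = true) : l ≠ '\n' := by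
  rintro rfl
  exact absurd h (by decide)

lemma reMatch_head (pre rest : List Char) (c : Char) :
    reMatchAt (pre ++ c :: rest) pre.length = removable pre.getLast? c rest.head? := by
  have hmid := getD_mid pre rest c
  by_cases hp : pre = []
  · subst hp
    cases rest <;> simp [reMatchAt, removable]
  · by_cases hr : rest = []
    · subst hr
      have h0 : pre.getLast? = some (pre.getLast hp) := List.getLast?_eq_some_getLast hp
      simp [reMatchAt, removable, hmid, h0]
    · have hL := getD_mid_left pre rest c hp
      have hR := getD_mid_right pre rest c hr
      have h0 : pre.getLast? = some (pre.getLast hp) := List.getLast?_eq_some_getLast hp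
      have h1 : rest.head? = some (rest.head hr) := List.head?_eq_some_head hr
      have hlp : (1 : Nat) ≤ pre.length := List.length_pos_iff.mpr hp
      have hlr0 : 0 < rest.length := List.length_pos_iff.mpr hr
      have hlen : pre.length + 1 < (pre ++ c :: rest).length := by
        simp only [List.length_append, List.length_cons]
        omega
      have hOl : reOther (pre.getLast hp) = (!is_ascii_letter (pre.getLast hp) && pre.getLast hp != '\n') := rfl
      have hOr : reOther (rest.head hr) = (!is_ascii_letter (rest.head hr) && rest.head hr != '\n') := rfl
      have hll : reLetter (pre.getLast hp) = is_ascii_letter (pre.getLast hp) := rfl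
      have hlr : reLetter (rest.head hr) = is_ascii_letter (rest.head hr) := rfl
      simp only [reMatchAt, removable, hmid, hL, hR, h0, h1, hlp, hlen, decide_true,
        Bool.true_and, Bool.and_true, hOl, hOr, hll, hlr]
      cases hcl : is_ascii_letter (pre.getLast hp) <;>
        cases hcr : is_ascii_letter (rest.head hr)
      · simp
      · have h3 : (rest.head hr != '\n') = true := by simp [letter_ne_nl _ hcr]
        simp [h3, Bool.and_assoc]
      · have h3 : (pre.getLast hp != '\n') = true := by simp [letter_ne_nl _ hcl]
        simp [h3, Bool.and_assoc]
      · simp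

lemma mainB (l pre : List Char) :
    reScan (pre ++ l) pre.length = refGo pre.getLast? l := by
  induction l generalizing pre with
  | nil =>
    rw [reScan]
    simp [refGo]
  | cons c rest ih =>
    rw [reScan]
    have hlt : pre.length < (pre ++ c :: rest).length := by
      simp only [List.length_append, List.length_cons]; omega
    have hel : (pre ++ c :: rest)[pre.length]'hlt = c := by
      rw [List.getElem_append_right (le_refl _)]
      simp
    have ih' := ih (pre ++ [c])
    simp only [List.length_append, List.length_nil, List.length_cons, zero_add,
      List.getLast?_concat, List.append_assoc, List.singleton_append] at ih'
    rw [dif_pos hlt, reMatch_head, hel]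
    by_cases h : removable pre.getLast? c rest.head? = true
    · simp [refGo, h, ih']
    · simp [refGo, h, ih']

-- ===== VERDICT (by name: the statement is the Claim_ definition above) =====
theorem collapse_cross_script_spaces_spec : Claim_equal_collapse_cross_script_spaces := by
  intro text _
  show _ = _
  unfold collapse_cross_script_spaces collapse_cross_script_spaces_alt
  simp only [bodyA_eq]
  rw [PySem.List.foldl_append_if]
  have hA := mainA text.toList []
  have hB := mainB text.toList []
  simp only [List.length_nil, Nat.cast_zero, List.getLast?_nil, List.nil_append] at hA hB
  rw [hA, hB, List.nil_append]
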